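-- pv_equiv track=rewrite | github.com/jennimm/PlanYourOpenSpaces | main.py | workPotential
-- ===== SOURCE A (Python) =====
-- def workPotential(dev1, dev2):
--     skills1 = dev1[3]
--     skills2 = dev2[3]
--     wp = 0
--     distinct = 0
--     for i in skills1:
--         for j in skills2:
--             if i == j:
--                 wp+=1
--             else:
--                 distinct+=1
--     return wp*(distinct-wp)
-- ===== SOURCE B (Python) =====
-- def workPotential(dev1, dev2):
--     skills1 = dev1[3]
--     skills2 = dev2[3]
--     c2 = {}
--     for s in skills2:
--         c2[s] = c2.get(s, 0) + 1
--     wp = 0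
--     for s in skills1:
--         wp += c2.get(s, 0)
--     return wp * (len(skills1) * len(skills2) - 2 * wp)
-- ===== Notes on version B (the rewrite author's own statement) =====
-- stated objective: alternative
-- what changed: Replaces the nested all-pairs loop by a one-pass frequency dict of skills2, computing wp as a sum of counts and distinct as len1*len2-wp algebraically.
import Mathlib
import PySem

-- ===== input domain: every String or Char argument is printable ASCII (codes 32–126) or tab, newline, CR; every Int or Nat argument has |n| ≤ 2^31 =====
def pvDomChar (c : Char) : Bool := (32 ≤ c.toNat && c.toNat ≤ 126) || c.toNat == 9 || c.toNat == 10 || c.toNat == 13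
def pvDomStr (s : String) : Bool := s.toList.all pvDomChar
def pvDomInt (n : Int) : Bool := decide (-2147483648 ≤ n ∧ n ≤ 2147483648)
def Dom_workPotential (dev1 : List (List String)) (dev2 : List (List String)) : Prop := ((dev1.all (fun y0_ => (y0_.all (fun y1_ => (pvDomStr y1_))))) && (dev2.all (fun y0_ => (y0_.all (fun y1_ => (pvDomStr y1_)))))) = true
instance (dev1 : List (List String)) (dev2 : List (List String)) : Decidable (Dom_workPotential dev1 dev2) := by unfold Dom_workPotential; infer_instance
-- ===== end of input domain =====

-- B replaces A's nested all-pairs loop by a one-pass frequency dict of skills2 plus the identity distinct = len1*len2 - wp (alternative algorithm; not measured faster here).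


-- ===== PORT A =====
def workPotential (dev1 : List (List String)) (dev2 : List (List String)) : Int :=
  let skills1 := PySem.List.pyGetD dev1 3 []
  let skills2 := PySem.List.pyGetD dev2 3 []
  let st := skills1.foldl (fun st i =>
      skills2.foldl (fun st j =>
        if i == j then (st.1 + 1, st.2) else (st.1, st.2 + 1)) st) ((0 : Int), (0 : Int))
  st.1 * (st.2 - st.1)

-- ===== PORT B =====
def workPotential_alt (dev1 : List (List String)) (dev2 : List (List String)) : Int :=
  let skills1 := PySem.List.pyGetD dev1 3 []
  let skills2 := PySem.List.pyGetD dev2 3 []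
  let c2 := skills2.foldl (fun d s => d.insert s (d.getD s 0 + 1)) PySem.Dict.empty
  let wp := skills1.foldl (fun acc s => acc + c2.getD s 0) (0 : Int)
  wp * ((skills1.length : Int) * (skills2.length : Int) - 2 * wp)

-- ===== PRECONDITION & SPEC =====
-- Pre_ excludes exactly the inputs where A raises IndexError (dev1[3] or dev2[3] out of range).
def Pre_workPotential (dev1 : List (List String)) (dev2 : List (List String)) : Prop :=
  4 ≤ dev1.length ∧ 4 ≤ dev2.length
instance (dev1 : List (List String)) (dev2 : List (List String)) : Decidable (Pre_workPotential dev1 dev2) := by unfold Pre_workPotential; infer_instance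
def pvWitness_workPotential : List (List String) × List (List String) :=
  ([[], [], [], ["a", "b", "a"]], [[], [], [], ["a", "c"]])
def Spec_workPotential (dev1 : List (List String)) (dev2 : List (List String)) (out : Int) : Prop := out = workPotential_alt dev1 dev2
instance (dev1 : List (List String)) (dev2 : List (List String)) (out : Int) : Decidable (Spec_workPotential dev1 dev2 out) := by unfold Spec_workPotential; infer_instance

-- ===== CLAIM (what is proved, stated in full; the proofs are below) =====
def Claim_equal_workPotential : Prop := ∀ (dev1 : List (List String)) (dev2 : List (List String)), Dom_workPotential dev1 dev2 → Pre_workPotential dev1 dev2 → Spec_workPotential dev1 dev2 (workPotential dev1 dev2)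

-- ===== LEMMAS AND PROOFS =====

-- A's inner loop over skills2: adds count of matches to wp and the rest to distinct.
lemma inner_loop (i : String) (s2 : List String) (w d : Int) :
    s2.foldl (fun st j => if i == j then (st.1 + 1, st.2) else (st.1, st.2 + 1)) (w, d)
      = (w + (s2.count i : Int), d + ((s2.length : Int) - (s2.count i : Int))) := by
  induction s2 generalizing w d with
  | nil => simp
  | cons j t ih =>
      simp only [List.foldl_cons, List.count_cons, List.length_cons]
      by_cases h : i == j
      · have h' : (j == i) = true := by
          simpa [BEq.comm] using h
        rw [if_pos h, ih]
        apply Prod.ext <;> simp [h'] <;> push_cast <;> ring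
      · have h' : (j == i) = false := by
          cases hji : (j == i) with
          | true => exact absurd (by simpa [BEq.comm] using hji) (by simpa using h)
          | false => rfl
        rw [if_neg (by simpa using h), ih]
        apply Prod.ext <;> simp [h'] <;> push_cast <;> ring

-- A's outer loop: wp accumulates the total match count, distinct the rest.
lemma outer_loop (s1 s2 : List String) (w d : Int) :
    s1.foldl (fun st i =>
        s2.foldl (fun st j => if i == j then (st.1 + 1, st.2) else (st.1, st.2 + 1)) st) (w, d)
      = (w + (s1.map (fun i => (s2.count i : Int))).sum,
         d + ((s1.length : Int) * (s2.length : Int) - (s1.map (fun i => (s2.count i : Int))).sum)) := by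
  induction s1 generalizing w d with
  | nil => simp
  | cons i t ih =>
      simp only [List.foldl_cons, List.map_cons, List.sum_cons, List.length_cons]
      rw [inner_loop, ih]
      apply Prod.ext <;> simp <;> push_cast <;> ring

-- ===== VERDICT (by name: the statement is the Claim_ definition above) =====
theorem workPotential_spec : Claim_equal_workPotential := by
  intro dev1 dev2 _ _
  unfold Spec_workPotential workPotential workPotential_alt
  simp only []
  set s1 := PySem.List.pyGetD dev1 3 ([] : List String)
  set s2 := PySem.List.pyGetD dev2 3 ([] : List String)
  rw [outer_loop]
  have hwp : s1.foldl
      (fun acc s => acc + (s2.foldl (fun d s => d.insert s (d.getD s 0 + 1)) PySem.Dict.empty).getD s 0) (0 : Int)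
      = (s1.map (fun i => (s2.count i : Int))).sum := by
    rw [PySem.List.foldl_add]
    simp [PySem.Dict.getD_foldl_insert_add_one]
  rw [hwp]
  ring
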